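-- pv_equiv track=rewrite | github.com/alexgorji/musicscore | musicscore/tests/util_subdivisions.py | get_next_pattern
-- ===== SOURCE A (Python) =====
-- def get_first_pattern(first_element, sum_):
--     output = (sum_ // first_element) * [first_element]
--     if sum(output) != sum_:
--         output += [sum_ - sum(output)]
--     return output
--
-- def get_next_pattern(current_pattern):
--     if set(current_pattern) == {1}:
--         return None
--     subdivision = sum(current_pattern)
--     first_element = current_pattern[0]
--     if len(current_pattern) > 1:
--         other_elements = current_pattern[1:]
--     else:
--         other_elements = None
--     if not other_elements or set(other_elements) == {1}:
--         return get_first_pattern(first_element - 1, subdivision)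
--     else:
--         output = [first_element] + get_next_pattern(other_elements)
--         return output
-- ===== SOURCE B (Python) =====
-- def get_first_pattern(first_element, sum_):
--     output = (sum_ // first_element) * [first_element]
--     if sum(output) != sum_:
--         output += [sum_ - sum(output)]
--     return output
--
-- def get_next_pattern(current_pattern):
--     # single backward scan for the last element that is not 1
--     i = None
--     for j in range(len(current_pattern) - 1, -1, -1):
--         if current_pattern[j] != 1:
--             i = j
--             break
--     if i is None:
--         return None
--     tail_ones = len(current_pattern) - 1 - i
--     return current_pattern[:i] + get_first_pattern(current_pattern[i] - 1,
--                                                    current_pattern[i] + tail_ones)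
-- ===== Notes on version B (the rewrite author's own statement) =====
-- stated objective: faster
-- what changed: A recurses over the list, re-building the suffix set and re-summing the suffix at every level (O(n^2)); B makes one backward scan for the last element != 1 and issues a single get_first_pattern call for that suffix (O(n + output)).
-- outside the precondition, e.g. on get_next_pattern([]): A raises IndexError, B returns None
import Mathlib
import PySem

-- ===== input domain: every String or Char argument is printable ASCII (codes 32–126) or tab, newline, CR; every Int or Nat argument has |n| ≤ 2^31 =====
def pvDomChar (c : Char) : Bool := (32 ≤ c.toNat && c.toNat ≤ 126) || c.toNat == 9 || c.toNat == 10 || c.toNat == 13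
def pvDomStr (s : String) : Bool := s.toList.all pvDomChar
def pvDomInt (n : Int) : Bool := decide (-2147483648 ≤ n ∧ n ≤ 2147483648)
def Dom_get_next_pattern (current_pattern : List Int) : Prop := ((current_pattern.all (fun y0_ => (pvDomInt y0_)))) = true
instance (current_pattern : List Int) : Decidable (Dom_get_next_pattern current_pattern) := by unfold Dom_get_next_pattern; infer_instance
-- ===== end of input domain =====

-- B replaces A's O(n^2) head-recursive enumeration (re-summing and re-checking the suffix at
-- every level) by one backward scan for the last non-1 element plus a single helper call
-- (objective: faster, asymptotic).


-- ===== PORT A =====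
-- helper get_first_pattern: (sum_ // first_element) * [first_element], pad with remainder.
-- Python list repetition with a negative count is []: Int.toNat models that exactly.
def get_first_patternA (first_element sum_ : Int) : List Int :=
  let output := List.replicate (PySem.Int.floordiv sum_ first_element).toNat first_element
  if output.sum ≠ sum_ then output ++ [sum_ - output.sum] else output

-- transliteration of A; the [] branch is unreachable under Pre_ (Python raises IndexError there)
def get_next_pattern (current_pattern : List Int) : Option (List Int) :=
  if PySem.Set.equal (PySem.Set.ofList current_pattern) (PySem.Set.ofList [1]) then none
  else
    let subdivision := current_pattern.sum
    match current_pattern with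
    | [] => none  -- current_pattern[0]: IndexError, excluded by Pre_
    | first_element :: rest =>
      if rest.length + 1 > 1 then
        if PySem.Set.equal (PySem.Set.ofList rest) (PySem.Set.ofList [1]) then
          some (get_first_patternA (first_element - 1) subdivision)
        else
          (get_next_pattern rest).map (fun t => first_element :: t)
      else
        some (get_first_patternA (first_element - 1) subdivision)

-- ===== PORT B =====
def get_first_patternB (first_element sum_ : Int) : List Int :=
  let output := List.replicate (PySem.Int.floordiv sum_ first_element).toNat first_element
  if output.sum ≠ sum_ then output ++ [sum_ - output.sum] else output

-- B's backward scan: index and value of the last element ≠ 1 (none if all are 1)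
def pvLastNonOne : List Int → Option (Nat × Int)
  | [] => none
  | x :: xs =>
    match pvLastNonOne xs with
    | some (j, v) => some (j + 1, v)
    | none => if x ≠ 1 then some (0, x) else none

def get_next_pattern_alt (current_pattern : List Int) : Option (List Int) :=
  match pvLastNonOne current_pattern with
  | none => none
  | some (i, v) =>
    let tail_ones : Int := (current_pattern.length : Int) - 1 - (i : Int)
    some (current_pattern.take i ++ get_first_patternB (v - 1) (v + tail_ones))

-- ===== PRECONDITION & SPEC =====
-- Pre_ excludes only the empty list, on which A raises IndexError (current_pattern[0]).
def Pre_get_next_pattern (current_pattern : List Int) : Prop := current_pattern ≠ []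
instance (current_pattern : List Int) : Decidable (Pre_get_next_pattern current_pattern) := by unfold Pre_get_next_pattern; infer_instance
def pvWitness_get_next_pattern : List Int := [3, 1, 2]

def Spec_get_next_pattern (current_pattern : List Int) (out : Option (List Int)) : Prop := out = get_next_pattern_alt current_pattern
instance (current_pattern : List Int) (out : Option (List Int)) : Decidable (Spec_get_next_pattern current_pattern out) := by unfold Spec_get_next_pattern; infer_instance

-- ===== CLAIM (what is proved, stated in full; the proofs are below) =====
def Claim_equal_get_next_pattern : Prop := ∀ (current_pattern : List Int), Dom_get_next_pattern current_pattern → Pre_get_next_pattern current_pattern → Spec_get_next_pattern current_pattern (get_next_pattern current_pattern)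

-- ===== LEMMAS AND PROOFS =====

theorem gfp_eq (a b : Int) : get_first_patternA a b = get_first_patternB a b := rfl

theorem set_equal_one_iff (xs : List Int) :
    PySem.Set.equal (PySem.Set.ofList xs) (PySem.Set.ofList [1]) = true ↔ (xs ≠ [] ∧ ∀ x ∈ xs, x = 1) := by
  rw [PySem.Set.equal_iff]
  constructor
  · intro h
    constructor
    · intro hnil
      have := (h 1).mpr (by simp [PySem.Set.mem_ofList])
      simp [hnil] at this
    · intro x hx
      have := (h x).mp (by simp [PySem.Set.mem_ofList]; exact hx)
      simpa [PySem.Set.mem_ofList] using this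
  · rintro ⟨hne, hall⟩ x
    simp only [PySem.Set.mem_ofList]
    constructor
    · intro hx; simp [hall x hx]
    · intro hx
      simp at hx
      subst hx
      cases xs with
      | nil => exact absurd rfl hne
      | cons y ys => exact (hall y (by simp)) ▸ List.mem_cons_self

theorem lastNonOne_none_iff (xs : List Int) :
    pvLastNonOne xs = none ↔ ∀ x ∈ xs, x = 1 := by
  induction xs with
  | nil => simp [pvLastNonOne]
  | cons y ys ih =>
    simp only [pvLastNonOne]
    cases h : pvLastNonOne ys with
    | some p => simp [← ih, h]
    | none =>
      have hys := ih.mp h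
      constructor
      · intro hnone x hx
        rcases List.mem_cons.mp hx with rfl | hx'
        · by_contra hy; simp [hy] at hnone
        · exact hys x hx'
      · intro hall
        simp [hall y (by simp)]

theorem sum_all_ones (xs : List Int) (h : ∀ x ∈ xs, x = 1) : xs.sum = (xs.length : Int) := by
  induction xs with
  | nil => simp
  | cons y ys ih =>
    have hy := h y (by simp)
    have := ih (fun x hx => h x (by simp [hx]))
    simp [hy, this]; ring

theorem A_allones (xs : List Int)
    (h : PySem.Set.equal (PySem.Set.ofList xs) (PySem.Set.ofList [1]) = true) :
    get_next_pattern xs = none := by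
  rw [get_next_pattern.eq_def]
  simp [h]

theorem A_stop (y : Int) (ys : List Int)
    (hA : ¬ PySem.Set.equal (PySem.Set.ofList (y :: ys)) (PySem.Set.ofList [1]) = true)
    (h : ys = [] ∨ PySem.Set.equal (PySem.Set.ofList ys) (PySem.Set.ofList [1]) = true) :
    get_next_pattern (y :: ys) = some (get_first_patternA (y - 1) ((y :: ys).sum)) := by
  rw [get_next_pattern.eq_def]
  rcases h with rfl | hAys
  · simp [hA]
  · cases ys with
    | nil => simp [hA]
    | cons a as => simp [hA, hAys]

theorem A_step (y : Int) (ys : List Int)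
    (hA : ¬ PySem.Set.equal (PySem.Set.ofList (y :: ys)) (PySem.Set.ofList [1]) = true)
    (hnnil : ys ≠ [])
    (hAys : ¬ PySem.Set.equal (PySem.Set.ofList ys) (PySem.Set.ofList [1]) = true) :
    get_next_pattern (y :: ys) = (get_next_pattern ys).map (fun t => y :: t) := by
  rw [get_next_pattern.eq_def]
  cases ys with
  | nil => exact absurd rfl hnnil
  | cons a as => simp [hA, hAys]

theorem B_stop (y : Int) (ys : List Int) (h : pvLastNonOne (y :: ys) = some (0, y)) :
    get_next_pattern_alt (y :: ys) = some (get_first_patternB (y - 1) (y + (ys.length : Int))) := by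
  simp only [get_next_pattern_alt, h, List.take_zero, List.nil_append, List.length_cons,
    Nat.cast_zero]
  push_cast
  ring_nf

theorem B_step (y : Int) (ys : List Int) (j : Nat) (w : Int)
    (h : pvLastNonOne ys = some (j, w)) :
    get_next_pattern_alt (y :: ys) = (get_next_pattern_alt ys).map (fun t => y :: t) := by
  have hcons : pvLastNonOne (y :: ys) = some (j + 1, w) := by
    simp [pvLastNonOne, h]
  simp only [get_next_pattern_alt, hcons, h, Option.map_some, List.take_succ_cons,
    List.length_cons, Nat.cast_add, Nat.cast_one, List.cons_append]
  ring_nf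

theorem main_eq (xs : List Int) (hne : xs ≠ []) :
    get_next_pattern xs = get_next_pattern_alt xs := by
  induction xs with
  | nil => exact absurd rfl hne
  | cons y ys ih =>
    by_cases hall : ∀ x ∈ (y :: ys), x = 1
    · -- all ones: both return none
      have hA : PySem.Set.equal (PySem.Set.ofList (y :: ys)) (PySem.Set.ofList [1]) = true :=
        (set_equal_one_iff _).mpr ⟨by simp, hall⟩
      have hB : pvLastNonOne (y :: ys) = none := (lastNonOne_none_iff _).mpr hall
      rw [A_allones _ hA]
      simp [get_next_pattern_alt, hB]
    · have hA : ¬ (PySem.Set.equal (PySem.Set.ofList (y :: ys)) (PySem.Set.ofList [1]) = true) := by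
        intro hc; exact hall ((set_equal_one_iff _).mp hc).2
      by_cases hys : ∀ x ∈ ys, x = 1
      · -- tail empty or all ones: A stops with head y; B's scan finds index 0
        have hBys : pvLastNonOne ys = none := (lastNonOne_none_iff _).mpr hys
        have hy1 : y ≠ 1 := by
          intro hy
          exact hall (fun x hx => by
            rcases List.mem_cons.mp hx with rfl | hx'
            · exact hy
            · exact hys x hx')
        have hB0 : pvLastNonOne (y :: ys) = some (0, y) := by
          simp [pvLastNonOne, hBys, hy1]
        have hstop : ys = [] ∨ PySem.Set.equal (PySem.Set.ofList ys) (PySem.Set.ofList [1]) = true := by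
          rcases eq_or_ne ys [] with rfl | hnnil
          · exact Or.inl rfl
          · exact Or.inr ((set_equal_one_iff _).mpr ⟨hnnil, hys⟩)
        rw [A_stop y ys hA hstop, B_stop y ys hB0, gfp_eq]
        have hsum : (y :: ys).sum = y + (ys.length : Int) := by
          simp [sum_all_ones ys hys]
        rw [hsum]
      · -- tail has a non-1: A recurses; B's scan found it in the tail
        have hnnil : ys ≠ [] := by rintro rfl; exact hys (by simp)
        have hAys : ¬ (PySem.Set.equal (PySem.Set.ofList ys) (PySem.Set.ofList [1]) = true) := by
          intro hc; exact hys ((set_equal_one_iff _).mp hc).2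
        obtain ⟨⟨j, w⟩, hBys⟩ : ∃ p, pvLastNonOne ys = some p := by
          cases h : pvLastNonOne ys with
          | none => exact absurd ((lastNonOne_none_iff _).mp h) hys
          | some p => exact ⟨p, rfl⟩
        rw [A_step y ys hA hnnil hAys, B_step y ys j w hBys, ih hnnil]

-- ===== VERDICT (by name: the statement is the Claim_ definition above) =====
theorem get_next_pattern_spec : Claim_equal_get_next_pattern := by
  intro cp _ hpre
  unfold Spec_get_next_pattern
  exact main_eq cp hpre
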